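-- pv_equiv track=rewrite | github.com/Kiminni/Algorithm | 프로그래머스/unrated/181860. 빈 배열에 추가， 삭제하기/빈 배열에 추가， 삭제하기.py | solution
-- ===== SOURCE A (Python) =====
-- def solution(arr, flag):
--     answer = []
--     for i in range(len(flag)):
--         if flag[i] == True:
--             answer += [arr[i]] * arr[i] * 2
--         else :
--             answer = answer[:len(answer) - arr[i]]
--     return answer
-- ===== SOURCE B (Python) =====
-- def solution(arr, flag):
--     # run-length blocks (value, count); deletions pop counts, expand once at the end
--     blocks = []
--     total = 0
--     for x, f in zip(arr, flag):
--         if f: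
--             if x > 0:
--                 blocks.append((x, 2 * x))
--                 total += 2 * x
--         else:
--             k = min(x, total)
--             total -= max(k, 0)
--             while k > 0:
--                 v, c = blocks[-1]
--                 if c <= k:
--                     blocks.pop()
--                     k -= c
--                 else:
--                     blocks[-1] = (v, c - k)
--                     k = 0
--     return [v for v, c in blocks for _ in range(c)]
-- ===== Notes on version B (the rewrite author's own statement) =====
-- stated objective: faster
-- what changed: B replaces A's repeated whole-list slicing/copying with a run-length stack of (value,count) blocks plus a running length, popping counts on deletions and expanding to the answer once at the end.
-- intended difference: On inputs where some deletion step requests more elements than the answer currently holds but fewer than twice that many (so A's negative slice stop wraps around) and that wrapped-around leftover is never fully deleted later, A returns a wrapped-around prefix while B deletes everything available; B's is the intended 'remove the last arr[i] elements' behaviour. — e.g. on solution([1, 3], [true, false]): A returns [1], B returns []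
import Mathlib
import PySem

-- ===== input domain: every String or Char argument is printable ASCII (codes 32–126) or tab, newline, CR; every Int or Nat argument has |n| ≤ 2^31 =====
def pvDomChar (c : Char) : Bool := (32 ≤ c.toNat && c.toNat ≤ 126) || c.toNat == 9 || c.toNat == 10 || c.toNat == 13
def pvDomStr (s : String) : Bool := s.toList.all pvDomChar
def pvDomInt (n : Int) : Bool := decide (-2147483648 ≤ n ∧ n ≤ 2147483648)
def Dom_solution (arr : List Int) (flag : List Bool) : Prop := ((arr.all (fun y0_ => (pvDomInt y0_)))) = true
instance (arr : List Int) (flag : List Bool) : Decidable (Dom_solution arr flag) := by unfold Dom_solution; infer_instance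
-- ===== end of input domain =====

-- B replaces A's per-step whole-list copying by a run-length (value,count) block stack with a
-- running length, expanded once at the end (objective: faster).

-- ===== PORT A =====
-- exact port of Python 'xs * n' (list repetition; empty for n ≤ 0)
def pyListMul {α : Type} (xs : List α) (n : Int) : List α :=
  (List.range n.toNat).flatMap (fun _ ↦ xs)

def solution (arr : List Int) (flag : List Bool) : List Int :=
  (PySem.List.pyRange 0 flag.length 1).foldl
    (fun answer i ↦
      if PySem.List.pyGetD flag i false = true then
        answer ++ pyListMul (pyListMul [PySem.List.pyGetD arr i 0] (PySem.List.pyGetD arr i 0)) 2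
      else
        PySem.List.slice answer none (some ((answer.length : Int) - PySem.List.pyGetD arr i 0)))
    []

-- ===== PORT B =====
-- the 'while k > 0' popping loop of Source B (stack head = Python stack top, reversed at the end)
def popK : List (Int × Int) → Int → List (Int × Int)
  | [], _ => []
  | (v, c) :: rest, k =>
    if k ≤ 0 then (v, c) :: rest
    else if c ≤ k then popK rest (k - c)
    else (v, c - k) :: rest

def stepB (st : List (Int × Int) × Int) (p : Int × Bool) : List (Int × Int) × Int :=
  if p.2 then
    if 0 < p.1 then ((p.1, 2 * p.1) :: st.1, st.2 + 2 * p.1) else st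
  else
    let k := min p.1 st.2
    (popK st.1 k, st.2 - max k 0)

def solution_alt (arr : List Int) (flag : List Bool) : List Int :=
  let st := (arr.zip flag).foldl stepB ([], 0)
  st.1.reverse.flatMap (fun p ↦ List.replicate p.2.toNat p.1)

-- ===== PRECONDITION & SPEC =====
-- A raises IndexError (arr[i]) as soon as i reaches len(arr) < len(flag); exactly those inputs are excluded.
def Pre_solution (arr : List Int) (flag : List Bool) : Prop := flag.length ≤ arr.length
instance (arr : List Int) (flag : List Bool) : Decidable (Pre_solution arr flag) := by
  unfold Pre_solution; infer_instance

def pvWitness_solution : List Int × List Bool := ([2, 1, 3], [true, false, true])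

-- On inputs where some deletion step requests more elements than the answer currently holds but
-- fewer than twice that many, A's negative slice stop wraps around and keeps a prefix, while B
-- deletes everything available — the intended 'remove the last arr[i] elements' behaviour; the
-- results stay different exactly when the two running lengths end up different (the folds below
-- track only those two intended/actual lengths; they compute no output).
def D_solution (arr : List Int) (flag : List Bool) : Prop :=
  let s := (arr.zip flag).foldl (fun s p ↦
      if p.2 then s + (2 * p.1.toNat, 2 * p.1.toNat)
      else ((if p.1.toNat ≤ s.1 then s.1 else 2 * s.1) - p.1.toNat, s.2 - p.1.toNat))
    ((0, 0) : Nat × Nat)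
  s.1 ≠ s.2
instance (arr : List Int) (flag : List Bool) : Decidable (D_solution arr flag) := by
  unfold D_solution; infer_instance

def Spec_solution (arr : List Int) (flag : List Bool) (out : List Int) : Prop :=
  ¬ D_solution arr flag → out = solution_alt arr flag
instance (arr : List Int) (flag : List Bool) (out : List Int) : Decidable (Spec_solution arr flag out) := by
  unfold Spec_solution; infer_instance

def pvDiffWitness_solution : List Int × List Bool := ([1, 3], [true, false])
def pvDiffWitnessOut_solution : (List Int) × (List Int) := ([1], [])

-- ===== CLAIM (what is proved, stated in full; the proofs are below) =====
def Claim_unchanged_solution : Prop := ∀ (arr : List Int) (flag : List Bool),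
  Dom_solution arr flag → Pre_solution arr flag → Spec_solution arr flag (solution arr flag)

def Claim_changed_solution : Prop :=
  Dom_solution (pvDiffWitness_solution.1) (pvDiffWitness_solution.2) ∧
  Pre_solution (pvDiffWitness_solution.1) (pvDiffWitness_solution.2) ∧
  D_solution (pvDiffWitness_solution.1) (pvDiffWitness_solution.2) ∧
  solution (pvDiffWitness_solution.1) (pvDiffWitness_solution.2) = pvDiffWitnessOut_solution.1 ∧
  solution_alt (pvDiffWitness_solution.1) (pvDiffWitness_solution.2) = pvDiffWitnessOut_solution.2 ∧
  pvDiffWitnessOut_solution.1 ≠ pvDiffWitnessOut_solution.2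

def Claim_exact_solution : Prop := ∀ (arr : List Int) (flag : List Bool),
  Dom_solution arr flag → Pre_solution arr flag → D_solution arr flag →
  solution arr flag ≠ solution_alt arr flag

-- ===== LEMMAS AND PROOFS =====

-- A's per-step transformation, written on the (value, flag) pair
def stepA (answer : List Int) (p : Int × Bool) : List Int :=
  if p.2 = true then
    answer ++ pyListMul (pyListMul [p.1] p.1) 2
  else
    PySem.List.slice answer none (some ((answer.length : Int) - p.1))

-- the fold body of D_solution, named for the proofs (s = (A's length, B's length))
def stepL : Nat × Nat → Int × Bool → Nat × Nat := fun s p ↦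
  if p.2 then s + (2 * p.1.toNat, 2 * p.1.toNat)
  else ((if p.1.toNat ≤ s.1 then s.1 else 2 * s.1) - p.1.toNat, s.2 - p.1.toNat)

theorem D_eq (arr : List Int) (flag : List Bool) :
    D_solution arr flag ↔
      ((arr.zip flag).foldl stepL (0, 0)).1 ≠ ((arr.zip flag).foldl stepL (0, 0)).2 :=
  Iff.rfl

-- expansion of the run-length stack
def flatRuns (st : List (Int × Int)) : List Int :=
  st.reverse.flatMap (fun p ↦ List.replicate p.2.toNat p.1)

theorem flatRuns_cons (v c : Int) (st : List (Int × Int)) :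
    flatRuns ((v, c) :: st) = flatRuns st ++ List.replicate c.toNat v := by
  simp [flatRuns]

theorem pyListMul_singleton (x : Int) (n : Int) :
    pyListMul [x] n = List.replicate n.toNat x := by
  simp [pyListMul]
  induction n.toNat with
  | zero => simp
  | succ k ih => simp [List.range_succ, ih, List.replicate_succ']

theorem pyListMul_two {α : Type} (xs : List α) : pyListMul xs 2 = xs ++ xs := by
  simp [pyListMul, List.range_succ]

-- what A's slice keeps, as a clamped length
def clampedLen (n k : Int) : Int :=
  let s := n - k
  let s := if s < 0 then s + n else s
  let s := if s < 0 then 0 else s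
  min s n

theorem slice_to_clampedLen (xs : List Int) (k : Int) :
    PySem.List.slice xs none (some ((xs.length : Int) - k)) =
      xs.take (clampedLen xs.length k).toNat := by
  by_cases h : (0 : Int) ≤ (xs.length : Int) - k
  · have e1 : clampedLen (xs.length : Int) k = min ((xs.length : Int) - k) (xs.length : Int) := by
      simp only [clampedLen]
      rw [if_neg (by omega), if_neg (by omega)]
    rw [PySem.List.slice_to _ h, e1]
    by_cases hm : ((xs.length : Int) - k) ≤ ((xs.length : Int))
    · rw [min_eq_left hm]
    · rw [min_eq_right (by omega : ((xs.length : Int)) ≤ ((xs.length : Int) - k))]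
      rw [List.take_of_length_le (by omega), List.take_of_length_le (by omega)]
  · have hk : 0 < (k - (xs.length : Int)).toNat := by omega
    have hb : ((xs.length : Int) - k) = -(((k - (xs.length : Int)).toNat : Nat) : Int) := by omega
    rw [hb, PySem.List.slice_to_neg_natCast xs (k - (xs.length : Int)).toNat hk]
    have h1 : ((xs.length : Int) - k) < 0 := by omega
    by_cases h2 : (2 * (xs.length : Int) - k) < 0
    · have e1 : clampedLen (xs.length : Int) k = min (0 : Int) (xs.length : Int) := by
        simp only [clampedLen]
        rw [if_pos h1, if_pos (by omega)]
      rw [e1]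
      congr 1
      omega
    · have e1 : clampedLen (xs.length : Int) k = min ((xs.length : Int) - k + (xs.length : Int)) (xs.length : Int) := by
        simp only [clampedLen]
        rw [if_pos h1, if_neg (by omega)]
      rw [e1]
      congr 1
      omega

-- A's next length is the first component of stepL
theorem stepA_length (answer : List Int) (b : Nat) (p : Int × Bool) :
    (stepA answer p).length = (stepL (answer.length, b) p).1 := by
  obtain ⟨x, f⟩ := p
  cases f with
  | true =>
    simp [stepA, stepL, pyListMul_singleton, pyListMul_two, Prod.mk_add_mk]
    omega
  | false =>
    have hsa : stepA answer (x, false) =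
        PySem.List.slice answer none (some ((answer.length : Int) - x)) := by simp [stepA]
    have hL : (stepL (answer.length, b) (x, false)).1 =
        (if x.toNat ≤ answer.length then answer.length else 2 * answer.length) - x.toNat := rfl
    rw [hsa, slice_to_clampedLen, hL, List.length_take]
    simp only [clampedLen]
    by_cases ht : x.toNat ≤ answer.length
    · rw [if_pos ht]
      split_ifs <;> omega
    · rw [if_neg ht]
      split_ifs <;> omega

-- invariant: counts positive, n = length of the expansion
def InvB (st : List (Int × Int)) (n : Int) : Prop :=
  (∀ p ∈ st, 0 < p.2) ∧ n = ((flatRuns st).length : Int)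

theorem popK_spec (st : List (Int × Int)) (n k : Int)
    (hinv : InvB st n) (hkn : k ≤ n) :
    flatRuns (popK st k) = (flatRuns st).take (n - max k 0).toNat ∧
      InvB (popK st k) (n - max k 0) := by
  induction st generalizing n k with
  | nil =>
    obtain ⟨-, hn⟩ := hinv
    simp [flatRuns] at hn
    refine ⟨by simp [popK, flatRuns], ⟨by simp [popK], ?_⟩⟩
    simp [flatRuns]
    omega
  | cons hd rest ih =>
    obtain ⟨v, c⟩ := hd
    obtain ⟨hpos, hn⟩ := hinv
    have hc : 0 < c := hpos (v, c) (List.mem_cons_self)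
    rw [flatRuns_cons] at hn
    simp only [List.length_append, List.length_replicate] at hn
    by_cases h1 : k ≤ 0
    · simp only [popK, if_pos h1]
      have hmax : max k 0 = 0 := by omega
      rw [hmax]
      have hlen : (flatRuns ((v, c) :: rest)).length ≤ (n - 0).toNat := by
        rw [flatRuns_cons]; simp; omega
      refine ⟨(List.take_of_length_le hlen).symm, hpos, ?_⟩
      rw [flatRuns_cons]; simp; omega
    · have h1' : ¬ k ≤ 0 := h1
      have hmax : max k 0 = k := by omega
      rw [hmax]
      by_cases h2 : c ≤ k
      · simp only [popK, if_neg h1', if_pos h2]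
        have hrest : InvB rest (n - c) := by
          refine ⟨fun p hp => hpos p (List.mem_cons_of_mem _ hp), by omega⟩
        obtain ⟨he, hi⟩ := ih (n - c) (k - c) hrest (by omega)
        have hmax2 : max (k - c) 0 = k - c := by omega
        rw [hmax2] at he hi
        refine ⟨?_, ?_⟩
        · rw [he, flatRuns_cons, List.take_append_of_le_length (by omega)]
          congr 1
          omega
        · have : n - c - (k - c) = n - k := by omega
          rwa [this] at hi
      · have h2' : ¬ c ≤ k := h2
        simp only [popK, if_neg h1', if_neg h2']
        refine ⟨?_, ?_, ?_⟩
        · rw [flatRuns_cons, flatRuns_cons]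
          have hlr : (flatRuns rest).length ≤ (n - k).toNat := by omega
          rw [List.take_append, List.take_of_length_le hlr, List.take_replicate]
          congr 2
          omega
        · intro p hp
          rcases List.mem_cons.mp hp with hq | hq
          · subst hq; simp; omega
          · exact hpos p (List.mem_cons_of_mem _ hq)
        · rw [flatRuns_cons]; simp; omega

-- the invariant survives every step of B
theorem stepB_inv (st : List (Int × Int)) (n : Int) (p : Int × Bool)
    (hinv : InvB st n) :
    InvB (stepB (st, n) p).1 (stepB (st, n) p).2 := by
  obtain ⟨x, f⟩ := p
  obtain ⟨hpos, hn⟩ := hinv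
  cases f with
  | true =>
    by_cases hx : 0 < x
    · have hstep : stepB (st, n) (x, true) = ((x, 2 * x) :: st, n + 2 * x) := by
        simp [stepB, hx]
      rw [hstep]
      refine ⟨?_, ?_⟩
      · intro q hq
        rcases List.mem_cons.mp hq with hq | hq
        · subst hq; simp; omega
        · exact hpos q hq
      · have hp2 : (((x, 2 * x) :: st, n + 2 * x) : List (Int × Int) × Int).2 = n + 2 * x := rfl
        rw [hp2, flatRuns_cons]
        simp only [List.length_append, List.length_replicate]
        omega
    · have hstep : stepB (st, n) (x, true) = (st, n) := by simp [stepB, hx]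
      rw [hstep]
      exact ⟨hpos, hn⟩
  | false =>
    have hstep : stepB (st, n) (x, false) = (popK st (min x n), n - max (min x n) 0) := by
      simp [stepB]
    rw [hstep]
    exact (popK_spec st n (min x n) ⟨hpos, hn⟩ (min_le_right _ _)).2

-- B's next running length is the second component of stepL
theorem stepB_total (st : List (Int × Int)) (p : Int × Bool) (a b : Nat)
    (_hinv : InvB st (b : Int)) :
    (stepB (st, (b : Int)) p).2 = ((stepL (a, b) p).2 : Int) := by
  obtain ⟨x, f⟩ := p
  cases f with
  | true =>
    by_cases hx : 0 < x <;> simp [stepB, stepL, hx, Prod.mk_add_mk] <;> omega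
  | false =>
    simp only [stepB, stepL]
    simp
    omega

-- when lengths agree and the deletion does not wrap, B reproduces A's step
theorem stepB_sim (answer : List Int) (st : List (Int × Int)) (n : Int) (p : Int × Bool)
    (hflat : flatRuns st = answer) (hinv : InvB st n)
    (hnowrap : p.2 = false → ¬ (n < p.1 ∧ p.1 < 2 * n)) :
    flatRuns (stepB (st, n) p).1 = stepA answer p := by
  obtain ⟨x, f⟩ := p
  obtain ⟨hpos, hn⟩ := hinv
  cases f with
  | true =>
    by_cases hx : 0 < x
    · have hstep : stepB (st, n) (x, true) = ((x, 2 * x) :: st, n + 2 * x) := by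
        simp [stepB, hx]
      have hsa : stepA answer (x, true) = answer ++ pyListMul (pyListMul [x] x) 2 := by
        simp [stepA]
      rw [hstep, hsa]
      rw [flatRuns_cons, hflat, pyListMul_singleton, pyListMul_two, ← List.replicate_add]
      have h2x : (2 * x).toNat = x.toNat + x.toNat := by omega
      rw [h2x]
    · have hstep : stepB (st, n) (x, true) = (st, n) := by simp [stepB, hx]
      have hsa : stepA answer (x, true) = answer ++ pyListMul (pyListMul [x] x) 2 := by
        simp [stepA]
      have hx0 : x.toNat = 0 := by omega
      rw [hstep, hsa, pyListMul_singleton, hx0]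
      simp [pyListMul, hflat]
  | false =>
    have hband : ¬ (n < x ∧ x < 2 * n) := hnowrap rfl
    have hn0 : 0 ≤ n := by rw [hn]; exact_mod_cast Int.natCast_nonneg _
    have hstep : stepB (st, n) (x, false) = (popK st (min x n), n - max (min x n) 0) := by
      simp [stepB]
    have hsa : stepA answer (x, false) =
        PySem.List.slice answer none (some ((answer.length : Int) - x)) := by
      simp [stepA]
    have hlen : n = (answer.length : Int) := by rw [← hflat]; exact hn
    obtain ⟨he, -⟩ := popK_spec st n (min x n) ⟨hpos, hn⟩ (min_le_right _ _)
    rw [hstep, hsa]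
    rw [he, hflat, hlen, slice_to_clampedLen]
    congr 2
    rw [← hlen]
    simp only [clampedLen]
    split_ifs <;> omega

-- one step of the joint simulation: lengths track stepL, the gap never reverses, and
-- whenever the two lengths coincide the two contents coincide
theorem step_all (answer : List Int) (st : List (Int × Int)) (a b : Nat) (p : Int × Bool)
    (hA : answer.length = a) (hinv : InvB st (b : Int)) (hba : b ≤ a)
    (hsync : a = b → flatRuns st = answer) :
    (stepA answer p).length = (stepL (a, b) p).1
    ∧ InvB (stepB (st, (b : Int)) p).1 (((stepL (a, b) p).2 : Nat) : Int)
    ∧ (stepL (a, b) p).2 ≤ (stepL (a, b) p).1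
    ∧ ((stepL (a, b) p).1 = (stepL (a, b) p).2 → flatRuns (stepB (st, (b : Int)) p).1 = stepA answer p) := by
  obtain ⟨x, f⟩ := p
  have hlenA : (stepA answer (x, f)).length = (stepL (a, b) (x, f)).1 := by
    rw [← hA]; exact stepA_length answer b (x, f)
  have htot : (stepB (st, (b : Int)) (x, f)).2 = ((stepL (a, b) (x, f)).2 : Int) :=
    stepB_total st (x, f) a b hinv
  have hinv' : InvB (stepB (st, (b : Int)) (x, f)).1 (((stepL (a, b) (x, f)).2 : Nat) : Int) := by
    have := stepB_inv st (b : Int) (x, f) hinv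
    rwa [htot] at this
  refine ⟨hlenA, hinv', ?_, ?_⟩
  · cases f with
    | true =>
      simp [stepL, Prod.mk_add_mk]
      omega
    | false =>
      have h1 : (stepL (a, b) (x, false)).1 = (if x.toNat ≤ a then a else 2 * a) - x.toNat := rfl
      have h2 : (stepL (a, b) (x, false)).2 = b - x.toNat := rfl
      rw [h1, h2]
      by_cases ht : x.toNat ≤ a
      · rw [if_pos ht]; omega
      · rw [if_neg ht]; omega
  · intro hab'
    by_cases hab : a = b
    · subst hab
      cases f with
      | true =>
        exact stepB_sim answer st (a : Int) (x, true) (hsync rfl) hinv (by simp)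
      | false =>
        by_cases hband : (a : Int) < x ∧ x < 2 * (a : Int)
        · exfalso
          have h1 : (stepL (a, a) (x, false)).1 = (if x.toNat ≤ a then a else 2 * a) - x.toNat := rfl
          have h2 : (stepL (a, a) (x, false)).2 = a - x.toNat := rfl
          rw [h1, h2] at hab'
          have hgt : ¬ x.toNat ≤ a := by omega
          rw [if_neg hgt] at hab'
          omega
        · exact stepB_sim answer st (a : Int) (x, false) (hsync rfl) hinv (fun _ => hband)
    · have hlt : b < a := lt_of_le_of_ne hba (Ne.symm hab)
      -- equal next lengths force both sides empty
      have hzero : (stepL (a, b) (x, f)).1 = 0 ∧ (stepL (a, b) (x, f)).2 = 0 := by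
        cases f with
        | true =>
          exfalso
          simp [stepL, Prod.mk_add_mk] at hab'
          omega
        | false =>
          have h1 : (stepL (a, b) (x, false)).1 = (if x.toNat ≤ a then a else 2 * a) - x.toNat := rfl
          have h2 : (stepL (a, b) (x, false)).2 = b - x.toNat := rfl
          rw [h1, h2] at hab' ⊢
          by_cases ht : x.toNat ≤ a
          · rw [if_pos ht] at hab' ⊢
            omega
          · rw [if_neg ht] at hab' ⊢
            omega
      have hAnil : stepA answer (x, f) = [] := by
        have : (stepA answer (x, f)).length = 0 := by rw [hlenA]; exact hzero.1
        exact List.eq_nil_of_length_eq_zero this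
      have hBnil : flatRuns (stepB (st, (b : Int)) (x, f)).1 = [] := by
        obtain ⟨-, hlen⟩ := hinv'
        have : ((flatRuns (stepB (st, (b : Int)) (x, f)).1).length : Int) = (((0 : Nat) : Nat) : Int) := by
          rw [← hlen, hzero.2]
        have hl0 : (flatRuns (stepB (st, (b : Int)) (x, f)).1).length = 0 := by exact_mod_cast this
        exact List.eq_nil_of_length_eq_zero hl0
      rw [hAnil, hBnil]

-- the joint simulation over the whole input
theorem fold_sim (l : List (Int × Bool)) (answer : List Int) (st : List (Int × Int)) (a b : Nat)
    (hA : answer.length = a) (hinv : InvB st (b : Int)) (hba : b ≤ a)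
    (hsync : a = b → flatRuns st = answer) :
    (l.foldl stepA answer).length = (l.foldl stepL (a, b)).1
    ∧ InvB (l.foldl stepB (st, (b : Int))).1 (((l.foldl stepL (a, b)).2 : Nat) : Int)
    ∧ ((l.foldl stepB (st, (b : Int))).2 = ((l.foldl stepL (a, b)).2 : Int))
    ∧ ((l.foldl stepL (a, b)).1 = (l.foldl stepL (a, b)).2 →
        flatRuns (l.foldl stepB (st, (b : Int))).1 = l.foldl stepA answer) := by
  induction l generalizing answer st a b with
  | nil =>
    exact ⟨hA, hinv, rfl, hsync⟩
  | cons p l ih =>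
    obtain ⟨h1, h2, h3, h4⟩ := step_all answer st a b p hA hinv hba hsync
    have htot : (stepB (st, (b : Int)) p).2 = ((stepL (a, b) p).2 : Int) :=
      stepB_total st p a b hinv
    simp only [List.foldl_cons]
    have hfold : (stepB (st, (b : Int)) p) = ((stepB (st, (b : Int)) p).1, (((stepL (a, b) p).2 : Nat) : Int)) := by
      rw [Prod.ext_iff]
      exact ⟨rfl, htot⟩
    rw [hfold]
    have hstepL : stepL (a, b) p = ((stepL (a, b) p).1, (stepL (a, b) p).2) := rfl
    rw [hstepL]
    exact ih (stepA answer p) (stepB (st, (b : Int)) p).1 (stepL (a, b) p).1 (stepL (a, b) p).2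
      h1 h2 h3 h4

-- A's indexed fold equals the fold of stepA over the zipped input
theorem A_as_zip (flag : List Bool) (arr : List Int) (answer : List Int)
    (h : flag.length ≤ arr.length) :
    (List.range flag.length).foldl
        (fun ans k => stepA ans (arr.getD k 0, flag.getD k false)) answer
      = (arr.zip flag).foldl stepA answer := by
  induction flag generalizing arr answer with
  | nil => simp
  | cons f fs ih =>
    cases arr with
    | nil => simp at h
    | cons x xs =>
      simp only [List.length_cons, List.range_succ_eq_map, List.foldl_cons, List.foldl_map,
        List.zip_cons_cons, Nat.succ_eq_add_one, List.getD_cons_succ, List.getD_cons_zero]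
      exact ih xs (stepA answer (x, f)) (by simpa using h)

-- A's port, rewritten as the stepA fold (uses Pre_: flag no longer than arr)
theorem solution_eq_fold (arr : List Int) (flag : List Bool) (hpre : Pre_solution arr flag) :
    solution arr flag = (arr.zip flag).foldl stepA [] := by
  unfold solution
  rw [PySem.List.pyRange_zero_natCast, List.foldl_map]
  have hbody : (fun (ans : List Int) (k : Nat) =>
      if PySem.List.pyGetD flag (k : Int) false = true then
        ans ++ pyListMul (pyListMul [PySem.List.pyGetD arr (k : Int) 0] (PySem.List.pyGetD arr (k : Int) 0)) 2
      else
        PySem.List.slice ans none (some ((ans.length : Int) - PySem.List.pyGetD arr (k : Int) 0)))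
      = fun ans k => stepA ans (arr.getD k 0, flag.getD k false) := by
    funext ans k
    simp [stepA, PySem.List.pyGetD_natCast]
  rw [hbody, A_as_zip flag arr [] hpre]

theorem alt_eq_flat (arr : List Int) (flag : List Bool) :
    solution_alt arr flag = flatRuns ((arr.zip flag).foldl stepB ([], 0)).1 := rfl

-- ===== VERDICT (by name: the statement is the Claim_ definition above) =====
theorem solution_spec : Claim_unchanged_solution := by
  intro arr flag _ hpre hnd
  have heq : ((arr.zip flag).foldl stepL (0, 0)).1 = ((arr.zip flag).foldl stepL (0, 0)).2 := by
    by_contra hne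
    exact hnd ((D_eq arr flag).mpr hne)
  obtain ⟨-, -, -, hs⟩ := fold_sim (arr.zip flag) [] [] 0 0 rfl
    ⟨by simp, by simp [flatRuns]⟩ le_rfl (fun _ => rfl)
  rw [solution_eq_fold arr flag hpre, alt_eq_flat]
  exact (hs heq).symm

theorem solution_changed : Claim_changed_solution := by
  unfold Claim_changed_solution; decide

theorem solution_tight : Claim_exact_solution := by
  intro arr flag _ hpre hd heq
  have hne := (D_eq arr flag).mp hd
  obtain ⟨hlenA, ⟨-, hlenB⟩, -, -⟩ := fold_sim (arr.zip flag) [] [] 0 0 rfl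
    ⟨by simp, by simp [flatRuns]⟩ le_rfl (fun _ => rfl)
  apply hne
  have h1 : (solution arr flag).length = ((arr.zip flag).foldl stepL (0, 0)).1 := by
    rw [solution_eq_fold arr flag hpre]; exact hlenA
  have h2 : (solution_alt arr flag).length = ((arr.zip flag).foldl stepL (0, 0)).2 := by
    have : ((flatRuns ((arr.zip flag).foldl stepB ([], 0)).1).length : Int)
        = (((arr.zip flag).foldl stepL (0, 0)).2 : Int) := hlenB.symm
    rw [alt_eq_flat]
    exact_mod_cast this
  rw [← h1, ← h2, heq]
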